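-- pv_equiv track=rewrite | github.com/mozillazg/python-shanbay-team-assistant | utils.py | group_iter
-- ===== SOURCE A (Python) =====
-- def group_iter(iterator, n=2, fill=False):
--     """| Given an iterator, it returns sub-lists made of n items
--     | (except the last that can have len < n)
--     | inspired by http://countergram.com/python-group-iterator-list-function
--
--     对列表进行分组：
--     list(group_iter([1, 2, 3, 4], 3)) -> [[1, 2, 3], [4]]
--     """
--     accumulator = []
--     for item in iterator:
--         accumulator.append(item)
--         if len(accumulator) == n:  # tested as fast as separate counter
--             yield accumulator
--             accumulator = []  # tested faster than accumulator[:] = []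
--             # and tested as fast as re-using one list object
--     if len(accumulator) != 0:
--         if fill:
--             accumulator += [None] * (n - len(accumulator))
--         yield accumulator
-- ===== SOURCE B (Python) =====
-- def group_iter(iterator, n=2, fill=False):
--     """Batch n items at a time from the iterator instead of
--     accumulating one item at a time and testing the running length."""
--     it = iter(iterator)
--     while True:
--         chunk = [x for _, x in zip(range(n), it)]
--         if not chunk:
--             return
--         if fill and len(chunk) < n:
--             chunk += [None] * (n - len(chunk))
--         yield chunk
-- ===== Notes on version B (the rewrite author's own statement) =====
-- stated objective: idiomatic
-- what changed: B batches n items per step (take-n from the iterator, one chunk per loop turn) instead of appending one item at a time to an accumulator and testing its running length; padding applies only to the trailing partial chunk. Pre_ excludes the degenerate sizes n <= 0, where grouping is unspecified and A's whole-list group and B's empty output are equally defensible.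
-- outside the precondition, e.g. on group_iter([1, 2], 0, False): A returns [[1, 2]], B returns []; on group_iter([1, 2], -1, True): A returns [[1, 2]], B returns []
import Mathlib
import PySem

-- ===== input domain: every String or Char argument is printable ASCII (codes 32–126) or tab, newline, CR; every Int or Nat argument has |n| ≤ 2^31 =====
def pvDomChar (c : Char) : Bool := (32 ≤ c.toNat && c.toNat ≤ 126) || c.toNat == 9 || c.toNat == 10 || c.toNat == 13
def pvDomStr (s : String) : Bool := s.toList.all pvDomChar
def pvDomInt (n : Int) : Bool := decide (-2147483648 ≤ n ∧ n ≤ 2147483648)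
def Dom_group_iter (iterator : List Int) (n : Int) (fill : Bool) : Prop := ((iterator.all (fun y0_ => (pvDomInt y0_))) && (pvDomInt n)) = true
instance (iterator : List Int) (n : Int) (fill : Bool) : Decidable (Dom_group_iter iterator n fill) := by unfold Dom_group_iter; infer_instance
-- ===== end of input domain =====

-- B batches n items per step (take n / drop n) instead of A's one-item accumulator with a running
-- length test; same groups and padding for every group size n >= 1 (Pre_). Objective: idiomatic.


-- ===== PORT A =====
-- A: fold over the items keeping (yielded groups so far, current accumulator); yield the
-- accumulator whenever its length reaches n, and finally yield (optionally padded) leftovers.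
def group_iter (iterator : List Int) (n : Int) (fill : Bool) : List (List (Option Int)) :=
  let s := iterator.foldl
    (fun (s : List (List (Option Int)) × List (Option Int)) item =>
      let acc := s.2 ++ [some item]
      if (acc.length : Int) = n then (s.1 ++ [acc], []) else (s.1, acc))
    ([], [])
  if s.2 ≠ [] then
    s.1 ++ [if fill then s.2 ++ List.replicate (n - (s.2.length : Int)).toNat (none : Option Int) else s.2]
  else s.1

-- ===== PORT B =====
-- B's loop: take up to n items as one chunk; stop when the chunk is empty, pad a short last chunk.
-- range(n) for n <= 0 is empty in Python, hence n.toNat.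
def groupAltGo (m : Nat) (fill : Bool) (ys : List Int) : List (List (Option Int)) :=
  if h : ys.take m = [] then []
  else
    (if fill ∧ (ys.take m).length < m
      then (ys.take m).map some ++ List.replicate (m - (ys.take m).length) (none : Option Int)
      else (ys.take m).map some) :: groupAltGo m fill (ys.drop m)
termination_by ys.length
decreasing_by
  simp only [List.take_eq_nil_iff, not_or] at h
  have hm : 0 < m := Nat.pos_of_ne_zero h.1
  rw [List.length_drop]
  cases ys with
  | nil => exact absurd rfl h.2
  | cons a t => simp only [List.length_cons]; omega

def group_iter_alt (iterator : List Int) (n : Int) (fill : Bool) : List (List (Option Int)) :=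
  groupAltGo n.toNat fill iterator

-- ===== PRECONDITION & SPEC =====
-- Pre_ excludes the degenerate group sizes n <= 0, a corner no caller of a grouping function
-- would specify and on which either value is defensible: A yields the whole input as one
-- oversized group, B's batching yields no groups at all.
def Pre_group_iter (iterator : List Int) (n : Int) (fill : Bool) : Prop := 1 ≤ n
instance (iterator : List Int) (n : Int) (fill : Bool) : Decidable (Pre_group_iter iterator n fill) := by unfold Pre_group_iter; infer_instance
def pvWitness_group_iter : List Int × Int × Bool := ([1, 2, 3, 4], 3, true)

def Spec_group_iter (iterator : List Int) (n : Int) (fill : Bool) (out : List (List (Option Int))) : Prop := out = group_iter_alt iterator n fill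
instance (iterator : List Int) (n : Int) (fill : Bool) (out : List (List (Option Int))) : Decidable (Spec_group_iter iterator n fill out) := by unfold Spec_group_iter; infer_instance

-- ===== CLAIM (what is proved, stated in full; the proofs are below) =====
def Claim_equal_group_iter : Prop := ∀ (iterator : List Int) (n : Int) (fill : Bool), Dom_group_iter iterator n fill → Pre_group_iter iterator n fill → Spec_group_iter iterator n fill (group_iter iterator n fill)

-- ===== LEMMAS AND PROOFS =====

-- A's fold, with the length test rewritten over Nat (valid since m = n.toNat and 1 ≤ n).
def aStep (m : Nat) (s : List (List (Option Int)) × List (Option Int)) (item : Int) :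
    List (List (Option Int)) × List (Option Int) :=
  let acc := s.2 ++ [some item]
  if acc.length = m then (s.1 ++ [acc], []) else (s.1, acc)

lemma foldl_aStep_eq (n : Int) (m : Nat) (hm : m = n.toNat) (hn : 1 ≤ n)
    (xs : List Int) (s : List (List (Option Int)) × List (Option Int)) :
    xs.foldl (fun s item =>
      let acc := s.2 ++ [some item]
      if (acc.length : Int) = n then (s.1 ++ [acc], []) else (s.1, acc)) s
    = xs.foldl (aStep m) s := by
  induction xs generalizing s with
  | nil => rfl
  | cons x t ih =>
    simp only [List.foldl_cons]
    have : ((((s.2 ++ [some x]).length : Nat) : Int) = n) ↔ ((s.2 ++ [some x]).length = m) := by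
      omega
    by_cases hc : (s.2 ++ [some x]).length = m
    · simp only [aStep, if_pos hc, if_pos (this.mpr hc)]; exact ih _
    · simp only [aStep, if_neg hc, if_neg (fun h => hc (this.mp h))]; exact ih _

-- Core invariant: folding A's step from accumulator `acc` (shorter than m) either never
-- completes a group, or emits exactly the first full group and continues from empty.
lemma aStep_fold_split (m : Nat) (xs : List Int) (out : List (List (Option Int)))
    (acc : List (Option Int)) (hacc : acc.length < m) :
    xs.foldl (aStep m) (out, acc)
    = if acc.length + xs.length < m then (out, acc ++ xs.map some)
      else (xs.drop (m - acc.length)).foldl (aStep m)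
            (out ++ [acc ++ (xs.take (m - acc.length)).map some], []) := by
  induction xs generalizing out acc with
  | nil => simp [hacc]
  | cons x t ih =>
    simp only [List.foldl_cons, aStep]
    by_cases hc : (acc ++ [some x]).length = m
    · simp only [if_pos hc]
      have hlen : acc.length + 1 = m := by simpa using hc
      have h1 : m - acc.length = 1 := by omega
      have hge : ¬ acc.length + (x :: t).length < m := by simp; omega
      rw [if_neg hge, h1]
      simp
    · simp only [if_neg hc]
      have hlt : (acc ++ [some x]).length < m := by
        have : (acc ++ [some x]).length ≤ m := by
          simpa using Nat.succ_le_of_lt hacc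
        omega
      rw [ih _ _ hlt]
      have hlen : (acc ++ [some x]).length = acc.length + 1 := by simp
      by_cases hs : acc.length + (x :: t).length < m
      · have : (acc ++ [some x]).length + t.length < m := by simp at hs ⊢; omega
        rw [if_pos this, if_pos hs]
        simp
      · have : ¬ ((acc ++ [some x]).length + t.length < m) := by simp at hs ⊢; omega
        rw [if_neg this, if_neg hs]
        have hk : m - acc.length = (m - (acc ++ [some x]).length) + 1 := by
          simp at hlt ⊢; omega
        rw [hk]
        simp [List.take_succ_cons, List.drop_succ_cons]

-- Finishing step of A applied to a fold state.
def aFinish (n : Int) (fill : Bool) (s : List (List (Option Int)) × List (Option Int)) :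
    List (List (Option Int)) :=
  if s.2 ≠ [] then
    s.1 ++ [if fill then s.2 ++ List.replicate (n - (s.2.length : Int)).toNat (none : Option Int) else s.2]
  else s.1

lemma altGo_nil (m : Nat) (fill : Bool) : groupAltGo m fill [] = [] := by
  unfold groupAltGo; simp

lemma altGo_cons (m : Nat) (fill : Bool) (ys : List Int) (h : ys.take m ≠ []) :
    groupAltGo m fill ys = (if fill ∧ (ys.take m).length < m
      then (ys.take m).map some ++ List.replicate (m - (ys.take m).length) (none : Option Int)
      else (ys.take m).map some) :: groupAltGo m fill (ys.drop m) := by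
  conv_lhs => unfold groupAltGo
  rw [dif_neg h]

lemma main_loop (n : Int) (m : Nat) (hm : m = n.toNat) (hn : 1 ≤ n) (fill : Bool) :
    ∀ k (xs : List Int), xs.length ≤ k → ∀ out,
      aFinish n fill (xs.foldl (aStep m) (out, [])) = out ++ groupAltGo m fill xs := by
  have hm1 : 1 ≤ m := by omega
  intro k
  induction k with
  | zero =>
    intro xs hxs out
    have : xs = [] := List.eq_nil_of_length_eq_zero (Nat.le_zero.mp hxs)
    subst this
    simp [aFinish, altGo_nil]
  | succ k ih =>
    intro xs hxs out
    have hsplit := aStep_fold_split m xs out [] (by simp only [List.length_nil]; omega)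
    simp only [List.length_nil, Nat.zero_add, Nat.sub_zero, List.nil_append] at hsplit
    rw [hsplit]
    by_cases hs : xs.length < m
    · rw [if_pos hs]
      cases xs with
      | nil => simp [aFinish, altGo_nil]
      | cons x t =>
        have htake : (x :: t).take m = x :: t := List.take_of_length_le (by omega)
        have hdrop : (x :: t).drop m = [] := List.drop_eq_nil_of_le (by omega)
        rw [altGo_cons m fill (x :: t) (by simp [htake])]
        rw [htake, hdrop, altGo_nil]
        have hlt : (x :: t).length < m := hs
        simp only [aFinish]
        by_cases hf : fill
        · have hrep : (n - ((t.length : Int) + 1)).toNat = m - (t.length + 1) := by omega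
          simp [hf, hrep]
          omega
        · simp [hf]
    · rw [if_neg hs]
      have hxne : xs ≠ [] := by intro h; subst h; simp at hs; omega
      have hdroplen : (xs.drop m).length ≤ k := by
        rw [List.length_drop]
        cases xs with
        | nil => exact absurd rfl hxne
        | cons a t => simp only [List.length_cons] at hxs ⊢; omega
      rw [ih (xs.drop m) hdroplen]
      have htake_ne : xs.take m ≠ [] := by
        intro hc
        rcases List.take_eq_nil_iff.mp hc with h0 | h0
        · omega
        · exact hxne h0
      rw [altGo_cons m fill xs htake_ne]
      have htlen : (xs.take m).length = m := by
        rw [List.length_take]; omega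
      rw [if_neg (by simp [htlen])]
      simp

-- ===== VERDICT (by name: the statement is the Claim_ definition above) =====
theorem group_iter_spec : Claim_equal_group_iter := by
  intro iterator n fill _ hpre
  unfold Spec_group_iter
  unfold group_iter group_iter_alt
  rw [foldl_aStep_eq n n.toNat rfl hpre]
  exact main_loop n n.toNat rfl hpre fill iterator.length iterator (le_refl _) []
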